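-- pv_equiv track=rewrite | github.com/LOSS98/IA-TP-Solver | DP_optimised.py | bigger_clauses
-- ===== SOURCE A (Python) =====
-- def bigger_clauses(clauses):
--     """Retourne les clauses qui contiennent d'autres clauses"""
--     clauses2 = []
--     # Optimisation: tri des clauses par longueur pour une vérification plus rapide des sous-ensembles
--     sorted_clauses = sorted(clauses, key=len)
--
--     for i, c2 in enumerate(sorted_clauses):
--         for c in sorted_clauses[i + 1:]:
--             if set(c2).issubset(set(c)):
--                 clauses2.append(c)
--
--     return clauses2
-- ===== SOURCE B (Python) =====
-- def bigger_clauses(clauses):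
--     """Retourne les clauses qui contiennent d'autres clauses"""
--     sorted_clauses = sorted(clauses, key=len)
--     n = len(sorted_clauses)
--     # inverted index: literal -> sorted list of indices of clauses containing it
--     index = {}
--     for j, c in enumerate(sorted_clauses):
--         for lit in set(c):
--             index.setdefault(lit, []).append(j)
--     out = []
--     for i, c2 in enumerate(sorted_clauses):
--         cand = None  # None means "all indices" (empty clause is subset of everything)
--         for lit in set(c2):
--             posting = set(index.get(lit, []))
--             cand = posting if cand is None else cand & posting
--         for j in range(i + 1, n):
--             if cand is None or j in cand:
--                 out.append(sorted_clauses[j])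
--     return out
-- ===== Notes on version B (the rewrite author's own statement) =====
-- stated objective: alternative
-- what changed: Replaces the pairwise set-subset tests over all later clauses with an inverted index mapping each literal to the indices of clauses containing it; each clause's containers are then found by an index-membership test (intersection of posting sets) instead of rebuilding and comparing sets per pair.
import Mathlib
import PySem

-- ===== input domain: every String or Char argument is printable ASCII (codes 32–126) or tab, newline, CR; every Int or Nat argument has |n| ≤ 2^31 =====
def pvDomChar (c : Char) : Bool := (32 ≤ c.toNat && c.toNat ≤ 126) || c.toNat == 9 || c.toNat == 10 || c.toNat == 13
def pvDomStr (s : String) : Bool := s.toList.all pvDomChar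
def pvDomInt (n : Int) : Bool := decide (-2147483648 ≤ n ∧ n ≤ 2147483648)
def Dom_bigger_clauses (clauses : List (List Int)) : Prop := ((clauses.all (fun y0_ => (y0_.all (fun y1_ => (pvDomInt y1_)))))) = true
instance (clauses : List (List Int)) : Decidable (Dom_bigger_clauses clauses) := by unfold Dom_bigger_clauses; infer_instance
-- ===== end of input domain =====

-- B replaces the pairwise subset tests with an inverted index (literal -> clause indices) and
-- an index-membership test per later clause; same return value, different data structure (objective: alternative).

-- ===== PORT A =====
def bigger_clauses (clauses : List (List Int)) : List (List Int) :=
  let sorted_clauses := PySem.List.sorted clauses (fun c => c.length)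
  (PySem.List.enumerate sorted_clauses).foldl
    (fun clauses2 ic =>
      (PySem.List.slice sorted_clauses (some (ic.1 + 1)) none).foldl
        (fun acc c =>
          if PySem.Set.issubset (PySem.Set.ofList ic.2) (PySem.Set.ofList c) then acc ++ [c] else acc)
        clauses2)
    []

-- ===== PORT B =====
-- index.setdefault(lit, []).append(j)  ==  d[lit] = d.get(lit, []) + [j]  ==  Dict.modify
def pvBuildIndex (sc : List (List Int)) : PySem.Dict Int (List Int) :=
  (PySem.List.enumerate sc).foldl
    (fun d jc => (PySem.Set.ofList jc.2).foldl (fun d lit => d.modify lit [] (fun p => p ++ [jc.1])) d)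
    PySem.Dict.empty

-- cand: None = "all indices"; folding set(c2), intersecting posting sets
def pvCand (index : PySem.Dict Int (List Int)) (c2 : List Int) : Option (PySem.Set Int) :=
  (PySem.Set.ofList c2).foldl
    (fun cand lit =>
      let posting := PySem.Set.ofList (index.getD lit [])
      some (match cand with | none => posting | some s => s.inter posting))
    none

def pvCandTest (cand : Option (PySem.Set Int)) (j : Int) : Bool :=
  match cand with | none => true | some s => s.contains j

def bigger_clauses_alt (clauses : List (List Int)) : List (List Int) :=
  let sorted_clauses := PySem.List.sorted clauses (fun c => c.length)
  let n : Int := sorted_clauses.length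
  let index := pvBuildIndex sorted_clauses
  (PySem.List.enumerate sorted_clauses).foldl
    (fun out ic =>
      let cand := pvCand index ic.2
      (PySem.List.pyRange (ic.1 + 1) n).foldl
        (fun out j => if pvCandTest cand j then out ++ [PySem.List.pyGetD sorted_clauses j []] else out)
        out)
    []

-- ===== PRECONDITION & SPEC =====
def Spec_bigger_clauses (clauses : List (List Int)) (out : List (List Int)) : Prop := out = bigger_clauses_alt clauses
instance (clauses : List (List Int)) (out : List (List Int)) : Decidable (Spec_bigger_clauses clauses out) := by unfold Spec_bigger_clauses; infer_instance

-- ===== CLAIM (what is proved, stated in full; the proofs are below) =====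
def Claim_equal_bigger_clauses : Prop := ∀ (clauses : List (List Int)), Dom_bigger_clauses clauses → Spec_bigger_clauses clauses (bigger_clauses clauses)

-- ===== LEMMAS AND PROOFS =====

-- one clause's contribution to the index: each distinct literal's posting list gains jc.1 once
theorem pv_inner_build (L : List Int) (hnd : L.Nodup) (j : Int) (d : PySem.Dict Int (List Int)) (v : Int) :
    (L.foldl (fun d lit => d.modify lit [] (fun p => p ++ [j])) d).getD v []
      = d.getD v [] ++ (if v ∈ L then [j] else []) := by
  induction L generalizing d with
  | nil => simp
  | cons x L ih =>
    simp only [List.foldl_cons]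
    rw [ih (List.Nodup.of_cons hnd)]
    by_cases hvx : v = x
    · subst hvx
      have hnotin : v ∉ L := (List.nodup_cons.mp hnd).1
      simp [hnotin, PySem.Dict.getD_modify_self]
    · rw [PySem.Dict.getD_modify_of_ne d [] _ hvx]
      simp [List.mem_cons, hvx]

-- index correctness over a list of (index, clause) pairs
theorem pv_build_getD (ps : List (Int × List Int)) (d : PySem.Dict Int (List Int)) (v : Int) :
    (ps.foldl (fun d jc => (PySem.Set.ofList jc.2).foldl
        (fun d lit => d.modify lit [] (fun p => p ++ [jc.1])) d) d).getD v []
      = d.getD v [] ++ (ps.filter (fun jc => decide (v ∈ jc.2))).map (·.1) := by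
  induction ps generalizing d with
  | nil => simp
  | cons jc ps ih =>
    simp only [List.foldl_cons]
    rw [ih]
    rw [pv_inner_build _ (PySem.Set.nodup_ofList jc.2) jc.1 d v]
    by_cases hv : v ∈ jc.2
    · simp [hv, PySem.Set.mem_ofList]
    · simp [hv, PySem.Set.mem_ofList]

-- membership in a posting list: (k : Int) is listed under v iff clause k contains v
theorem pv_index_mem (sc : List (List Int)) (v : Int) (k : Nat) (hk : k < sc.length) :
    ((pvBuildIndex sc).getD v [] ).contains (k : Int) = true ↔ v ∈ sc[k] := by
  unfold pvBuildIndex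
  rw [pv_build_getD]
  simp only [PySem.Dict.getD_empty, List.nil_append, List.contains_eq_mem, List.mem_map,
    List.mem_filter, decide_eq_true_eq]
  constructor
  · rintro ⟨jc, ⟨hmem, hv⟩, hfst⟩
    rcases (PySem.List.mem_enumerate_iff _ _ _).mp hmem with ⟨m, hm, rfl⟩
    simp only [zero_add] at hfst
    have : m = k := by exact_mod_cast hfst
    subst this; exact hv
  · intro hv
    refine ⟨((k : Int), sc[k]), ⟨?_, hv⟩, rfl⟩
    rw [PySem.List.mem_enumerate_iff]
    exact ⟨k, hk, by simp⟩

-- the candidate test is the literal-by-literal index membership test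
theorem pv_candTest (index : PySem.Dict Int (List Int)) (c2 : List Int) (j : Int) :
    pvCandTest (pvCand index c2) j
      = (PySem.Set.ofList c2).all (fun v => (index.getD v []).contains j) := by
  unfold pvCand
  have hgen : ∀ (L : List Int) (cand : Option (PySem.Set Int)),
      pvCandTest (L.foldl (fun cand lit =>
          some (match cand with
                | none => PySem.Set.ofList (index.getD lit [])
                | some s => s.inter (PySem.Set.ofList (index.getD lit [])))) cand) j
        = (pvCandTest cand j && L.all (fun v => (index.getD v []).contains j)) := by
    intro L
    induction L with
    | nil => simp
    | cons x L ih =>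
      intro cand
      simp only [List.foldl_cons, List.all_cons]
      rw [ih]
      have hx : pvCandTest (some (match cand with
            | none => PySem.Set.ofList (index.getD x [])
            | some s => s.inter (PySem.Set.ofList (index.getD x [])))) j
          = (pvCandTest cand j && (index.getD x []).contains j) := by
        cases cand with
        | none =>
          simp only [pvCandTest, Bool.true_and]
          rw [Bool.eq_iff_iff]
          simp [PySem.Set.contains, PySem.Set.mem_ofList]
        | some s =>
          simp only [pvCandTest]
          rw [Bool.eq_iff_iff]
          simp [PySem.Set.contains, PySem.Set.mem_inter, PySem.Set.mem_ofList, Bool.and_eq_true]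
      rw [hx, Bool.and_assoc]
  rw [hgen]
  simp [pvCandTest]

-- walking range(i, n) and indexing is walking drop i, when the tests agree pointwise
theorem pv_range_filter_map (xs : List (List Int)) (p : Int → Bool) (q : List Int → Bool)
    (hpq : ∀ (k : Nat), k < xs.length → p (k : Int) = q (xs.getD k [])) :
    ∀ (i : Nat),
      ((PySem.List.pyRange (i : Int) (xs.length : Int)).filter p).map
          (fun j => PySem.List.pyGetD xs j [])
        = (xs.drop i).filter q := by
  intro i
  by_cases h : i < xs.length
  · have hlt : (i : Int) < (xs.length : Int) := by exact_mod_cast h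
    rw [PySem.List.pyRange_one_cons hlt]
    have hstep : (i : Int) + 1 = ((i + 1 : Nat) : Int) := by push_cast; ring
    rw [List.filter_cons, List.drop_eq_getElem_cons h, List.filter_cons]
    have hq : p (i : Int) = q xs[i] := by
      rw [hpq i h]; congr 1; exact List.getD_eq_getElem xs [] h
    rw [hq]
    have ih := pv_range_filter_map xs p q hpq (i + 1)
    rw [hstep]
    by_cases hqi : q xs[i] = true
    · simp only [hqi, if_true, List.map_cons, ih]
      congr 1
      rw [PySem.List.pyGetD_natCast, List.getD_eq_getElem xs [] h]
    · simp only [hqi, Bool.false_eq_true, if_false, ih]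
  · have hle : (xs.length : Int) ≤ (i : Int) := by exact_mod_cast Nat.le_of_not_lt h
    rw [PySem.List.pyRange_one_eq_nil hle, List.drop_eq_nil_of_le (Nat.le_of_not_lt h)]
    simp
  termination_by i => xs.length - i
  decreasing_by omega

-- per outer-iteration equality of the two inner loops' contributions
theorem pv_inner_eq (sc : List (List Int)) (k : Nat) (hk : k < sc.length) :
    (PySem.List.slice sc (some ((k : Int) + 1)) none).filter
        (fun c => PySem.Set.issubset (PySem.Set.ofList sc[k]) (PySem.Set.ofList c))
      = ((PySem.List.pyRange ((k : Int) + 1) (sc.length : Int)).filter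
            (fun j => pvCandTest (pvCand (pvBuildIndex sc) sc[k]) j)).map
          (fun j => PySem.List.pyGetD sc j []) := by
  have hstep : (k : Int) + 1 = ((k + 1 : Nat) : Int) := by push_cast; ring
  rw [hstep, pv_range_filter_map sc _ _ ?_ (k + 1)]
  · rw [PySem.List.slice_from sc (by positivity)]
    congr 1
  · intro m hm
    rw [pv_candTest]
    rw [Bool.eq_iff_iff]
    constructor
    · intro hall
      rw [List.getD_eq_getElem sc [] hm]
      rw [PySem.Set.issubset_iff]
      intro v hv
      rw [PySem.Set.mem_ofList] at hv ⊢
      have := (List.all_eq_true.mp hall) v ((PySem.Set.mem_ofList _ _).mpr hv)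
      exact (pv_index_mem sc v m hm).mp this
    · intro hsub
      rw [List.getD_eq_getElem sc [] hm, PySem.Set.issubset_iff] at hsub
      rw [List.all_eq_true]
      intro v hv
      rw [PySem.Set.mem_ofList] at hv
      refine (pv_index_mem sc v m hm).mpr ?_
      have := hsub v ((PySem.Set.mem_ofList _ _).mpr hv)
      rwa [PySem.Set.mem_ofList] at this

-- ===== VERDICT (by name: the statement is the Claim_ definition above) =====
theorem bigger_clauses_spec : Claim_equal_bigger_clauses := by
  intro clauses _
  unfold Spec_bigger_clauses bigger_clauses bigger_clauses_alt
  set sc := PySem.List.sorted clauses (fun c => c.length) with hsc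
  simp only []
  apply PySem.List.foldl_congr_mem
  intro acc ic hic
  rcases (PySem.List.mem_enumerate_iff _ _ _).mp hic with ⟨k, hk, rfl⟩
  simp only [zero_add]
  rw [PySem.List.foldl_append_if_eq_filter, PySem.List.foldl_append_if]
  rw [pv_inner_eq sc k hk]
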